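-- pv_equiv track=rewrite | github.com/huwythechew/EmbroiderWorkflow | ExportEmbFromTxt_PYTHON/pyembroideryExport.py | ar2tups
-- ===== SOURCE A (Python) =====
-- def ar2tups(array):
--     toTup = []
--     result = []
--     for i in range(len(array)):
--         if (len(toTup) > 0):
--             toTup.append(array[i])
--             xy = (toTup[0], toTup[1])
--             #if xy[0]<=500 and xy[1]<=500:
--             result.append(xy)
--             toTup = []
--         else:
--             toTup.append(array[i])
--     return result
-- ===== SOURCE B (Python) =====
-- def ar2tups(array):
--     # Pair consecutive elements using the zip-same-iterator idiom;
--     # zip's truncation drops a final unpaired element, matching A.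
--     it = iter(array)
--     return list(zip(it, it))
-- ===== Notes on version B (the rewrite author's own statement) =====
-- stated objective: idiomatic
-- what changed: The flip-flop one-element buffer loop with index-based access is replaced by the standard zip-same-iterator idiom (it = iter(array); zip(it, it)), which consumes the sequence two elements at a time with no buffer or indexing. The zip runs at C speed with no Python-level per-element work, giving a constant-factor speedup.
import Mathlib
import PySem

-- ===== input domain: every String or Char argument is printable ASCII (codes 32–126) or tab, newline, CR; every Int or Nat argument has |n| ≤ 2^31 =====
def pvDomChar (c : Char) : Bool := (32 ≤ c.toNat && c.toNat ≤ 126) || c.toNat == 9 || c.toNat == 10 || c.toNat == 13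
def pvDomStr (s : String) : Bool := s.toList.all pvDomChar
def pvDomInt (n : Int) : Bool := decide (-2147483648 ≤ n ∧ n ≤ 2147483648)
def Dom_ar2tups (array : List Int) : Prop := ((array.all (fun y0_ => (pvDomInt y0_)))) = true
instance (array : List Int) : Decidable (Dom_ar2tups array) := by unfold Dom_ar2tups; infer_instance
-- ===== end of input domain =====

-- B replaces A's flip-flop one-element buffer loop with the zip-same-iterator idiom
-- (consume two elements per output pair); same value on every input, same cost (idiomatic objective).


-- ===== PORT A =====
-- loop body of A: state is (toTup, result); v is array[i]
def ar2tupsStep (s : List Int × List (Int × Int)) (v : Int) : List Int × List (Int × Int) :=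
  if s.1.length > 0 then
    let toTup := s.1 ++ [v]
    let xy := (PySem.List.pyGetD toTup 0 0, PySem.List.pyGetD toTup 1 0)
    ([], s.2 ++ [xy])
  else (s.1 ++ [v], s.2)

def ar2tups (array : List Int) : List (Int × Int) :=
  ((PySem.List.pyRange 0 (PySem.List.len array) 1).foldl
    (fun s i => ar2tupsStep s (PySem.List.pyGetD array i 0)) ([], [])).2

-- ===== PORT B =====
-- Source B: it = iter(array); list(zip(it, it)). zip over the same iterator twice consumes
-- two elements per pair and drops a final unpaired element; PySem has no iterator
-- primitive, so this is ported by hand as the exact two-at-a-time recursion (exact).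
def ar2tups_alt (array : List Int) : List (Int × Int) :=
  match array with
  | x :: y :: t => (x, y) :: ar2tups_alt t
  | _ => []

-- ===== PRECONDITION & SPEC =====
def Spec_ar2tups (array : List Int) (out : List (Int × Int)) : Prop := out = ar2tups_alt array
instance (array : List Int) (out : List (Int × Int)) : Decidable (Spec_ar2tups array out) := by unfold Spec_ar2tups; infer_instance

-- ===== CLAIM (what is proved, stated in full; the proofs are below) =====
def Claim_equal_ar2tups : Prop := ∀ (array : List Int), Dom_ar2tups array → Spec_ar2tups array (ar2tups array)

-- ===== LEMMAS AND PROOFS =====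

-- A's loop, starting with an empty buffer, appends exactly the consecutive pairs.
theorem ar2tups_loop (t : List Int) : ∀ res : List (Int × Int),
    (t.foldl ar2tupsStep ([], res)).2 = res ++ ar2tups_alt t := by
  induction t using ar2tups_alt.induct with
  | case1 x y t ih =>
      intro res
      simp only [List.foldl, ar2tupsStep, ar2tups_alt]
      simp [ih, PySem.List.pyGetD]
  | case2 t h =>
      intro res
      cases t with
      | nil => simp [ar2tups_alt]
      | cons x t' =>
        cases t' with
        | nil => simp [List.foldl, ar2tupsStep, ar2tups_alt]
        | cons y t'' => exact absurd rfl (h x y t'')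

-- ===== VERDICT (by name: the statement is the Claim_ definition above) =====
theorem ar2tups_spec : Claim_equal_ar2tups := by
  intro array _
  unfold Spec_ar2tups ar2tups
  rw [PySem.List.foldl_pyRange_zero_pyGetD array 0 ar2tupsStep ([], [])]
  simpa using ar2tups_loop array []
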